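-- pv_equiv track=rewrite | github.com/SomiaWhiteRing/demotivational-world-scenic | Crawler/jimdo_fetch.py | parse_srcset
-- ===== SOURCE A (Python) =====
-- from typing import List, Optional, Tuple
--
-- def parse_srcset(srcset: str) -> Optional[str]:
--     """Pick the largest candidate from srcset string.
--     Returns URL string or None.
--     """
--     if not srcset:
--         return None
--     candidates: List[Tuple[str, int]] = []
--     for part in srcset.split(","):
--         part = part.strip()
--         if not part:
--             continue
--         pieces = part.split()
--         url = pieces[0]
--         width = 0
--         if len(pieces) > 1 and pieces[1].endswith("w"):
--             try:
--                 width = int(pieces[1][:-1])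
--             except ValueError:
--                 width = 0
--         candidates.append((url, width))
--     if not candidates:
--         return None
--     # Pick the max width; if widths missing, fall back to last
--     candidates.sort(key=lambda x: x[1])
--     return candidates[-1][0]
-- ===== SOURCE B (Python) =====
-- from typing import Optional
--
-- def parse_srcset(srcset: str) -> Optional[str]:
--     """Pick the largest candidate from srcset string (single max-scan, no sort).
--     Returns URL string or None.
--     """
--     best_url: Optional[str] = None
--     best_width = 0
--     for part in srcset.split(","):
--         part = part.strip()
--         if not part:
--             continue
--         pieces = part.split()
--         url = pieces[0]
--         width = 0
--         if len(pieces) > 1 and pieces[1].endswith("w"):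
--             try:
--                 width = int(pieces[1][:-1])
--             except ValueError:
--                 width = 0
--         if best_url is None or width >= best_width:
--             best_url, best_width = url, width
--     return best_url
-- ===== Notes on version B (the rewrite author's own statement) =====
-- stated objective: faster
-- what changed: Replaces building a candidate list, stably sorting it by width and taking the last element with a single running best_url/best_width max-scan (>= so ties keep the last candidate) inside the same parsing loop.
import Mathlib
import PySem

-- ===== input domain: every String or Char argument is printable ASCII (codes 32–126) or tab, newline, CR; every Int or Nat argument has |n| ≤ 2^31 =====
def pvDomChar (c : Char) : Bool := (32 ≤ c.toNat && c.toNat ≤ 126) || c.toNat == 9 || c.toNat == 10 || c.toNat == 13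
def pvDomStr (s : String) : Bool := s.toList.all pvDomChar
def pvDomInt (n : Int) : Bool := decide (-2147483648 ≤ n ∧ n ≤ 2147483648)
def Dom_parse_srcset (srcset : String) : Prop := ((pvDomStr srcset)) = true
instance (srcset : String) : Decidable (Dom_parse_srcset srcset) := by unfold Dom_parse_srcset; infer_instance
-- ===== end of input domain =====

-- B replaces A's sort-then-take-last with a single running max-scan (same parsing, no candidate list, no sort).

-- ===== PORT A =====
-- loop body of A's 'for part in srcset.split(",")' building the candidates list
def pvA_body (cs : List (String × Int)) (part : String) : List (String × Int) :=
  let part := PySem.Str.strip part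
  if part == "" then cs          -- if not part: continue
  else
    let pieces := PySem.Str.split₀ part
    let url := pieces.headD ""   -- pieces[0]; pieces ≠ [] because part is stripped and non-empty
    let width : Int :=
      -- pieces[1] is guarded by len(pieces) > 1, so getD never uses its default
      if pieces.length > 1 && PySem.Str.endswith (pieces.getD 1 "") "w" then
        (PySem.Int.ofStr? (PySem.Str.slice (pieces.getD 1 "") none (some (-1)))).getD 0  -- try int(...) except ValueError: 0
      else 0
    cs ++ [(url, width)]

def parse_srcset (srcset : String) : Option String :=
  if srcset == "" then none
  else
    let candidates := ((PySem.Str.split? srcset ",").getD []).foldl pvA_body []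
    if candidates == [] then none
    else
      let sortedC := PySem.List.sorted candidates (fun x : String × Int => x.2)   -- sep "," ≠ "" so split? is some; candidates.sort(key=lambda x: x[1]) (stable)
      match PySem.List.pyGet? sortedC (-1) with                    -- candidates[-1][0]
      | some c => some c.1
      | none => none                                               -- unreachable: candidates ≠ []

-- ===== PORT B =====
-- the update step: if best_url is None or width >= best_width, take (url, width)
def pvBestStep (st : Option String × Int) (c : String × Int) : Option String × Int :=
  if st.1 = none ∨ st.2 ≤ c.2 then (some c.1, c.2) else st

-- loop body of B's single max-scan: state is (best_url, best_width)
def pvB_body (st : Option String × Int) (part : String) : Option String × Int :=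
  let part := PySem.Str.strip part
  if part == "" then st          -- if not part: continue
  else
    let pieces := PySem.Str.split₀ part
    let url := pieces.headD ""   -- pieces[0]; pieces ≠ [] because part is stripped and non-empty
    let width : Int :=
      if pieces.length > 1 && PySem.Str.endswith (pieces.getD 1 "") "w" then
        (PySem.Int.ofStr? (PySem.Str.slice (pieces.getD 1 "") none (some (-1)))).getD 0
      else 0
    pvBestStep st (url, width)   -- if best_url is None or width >= best_width: best_url, best_width = url, width

def parse_srcset_alt (srcset : String) : Option String :=
  (((PySem.Str.split? srcset ",").getD []).foldl pvB_body (none, 0)).1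

-- ===== PRECONDITION & SPEC =====
def Spec_parse_srcset (srcset : String) (out : Option String) : Prop := out = parse_srcset_alt srcset
instance (srcset : String) (out : Option String) : Decidable (Spec_parse_srcset srcset out) := by unfold Spec_parse_srcset; infer_instance

-- ===== CLAIM (what is proved, stated in full; the proofs are below) =====
def Claim_equal_parse_srcset : Prop := ∀ (srcset : String), Dom_parse_srcset srcset → Spec_parse_srcset srcset (parse_srcset srcset)

-- ===== LEMMAS AND PROOFS =====

-- the (url, width) candidate a part contributes, if any (proof-side view of the shared parsing code)
def pvCand? (part : String) : Option (String × Int) :=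
  let part := PySem.Str.strip part
  if part == "" then none
  else
    let pieces := PySem.Str.split₀ part
    let url := pieces.headD ""
    let width : Int :=
      if pieces.length > 1 && PySem.Str.endswith (pieces.getD 1 "") "w" then
        (PySem.Int.ofStr? (PySem.Str.slice (pieces.getD 1 "") none (some (-1)))).getD 0
      else 0
    some (url, width)

lemma pvA_body_eq (cs : List (String × Int)) (part : String) :
    pvA_body cs part = match pvCand? part with | none => cs | some c => cs ++ [c] := by
  unfold pvA_body pvCand?
  by_cases h : PySem.Str.strip part == "" <;> simp [h]

lemma pvB_body_eq (st : Option String × Int) (part : String) :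
    pvB_body st part = match pvCand? part with | none => st | some c => pvBestStep st c := by
  unfold pvB_body pvCand?
  by_cases h : PySem.Str.strip part == "" <;> simp [h]

lemma pvA_fold (parts : List String) (acc : List (String × Int)) :
    parts.foldl pvA_body acc = acc ++ parts.filterMap pvCand? := by
  induction parts generalizing acc with
  | nil => simp
  | cons p ps ih =>
    simp only [List.foldl_cons, List.filterMap_cons, pvA_body_eq]
    cases h : pvCand? p <;> simp [ih]

lemma pvB_fold (parts : List String) (st : Option String × Int) :
    parts.foldl pvB_body st = (parts.filterMap pvCand?).foldl pvBestStep st := by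
  induction parts generalizing st with
  | nil => rfl
  | cons p ps ih =>
    simp only [List.foldl_cons, List.filterMap_cons, pvB_body_eq]
    cases h : pvCand? p <;> simp [ih]

lemma pv_insertBy_getLast (x m : String × Int) :
    ∀ (S : List (String × Int)), S.Pairwise (fun a b => a.2 ≤ b.2) → S.getLast? = some m →
    (PySem.List.insertBy (fun a b => decide (a.2 < b.2)) x S).getLast? =
      if m.2 ≤ x.2 then some x else some m := by
  intro S
  induction S with
  | nil => intro _ h; simp at h
  | cons y ys ih =>
    intro hpw hlast
    have hym : y.2 ≤ m.2 := by
      have hm : m ∈ y :: ys := List.mem_of_getLast? hlast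
      rcases List.mem_cons.mp hm with h | h
      · simp [h]
      · exact (List.pairwise_cons.mp hpw).1 m h
    by_cases hlt : x.2 < y.2
    · have : ¬ m.2 ≤ x.2 := by omega
      simp [PySem.List.insertBy, hlt, this, hlast]
    · cases ys with
      | nil =>
        simp at hlast
        simp [PySem.List.insertBy, hlt, hlast.symm, le_of_not_gt hlt]
      | cons z zs =>
        have hlast' : (z :: zs).getLast? = some m := by
          simpa [List.getLast?_cons_cons] using hlast
        have := ih (List.pairwise_cons.mp hpw).2 hlast'
        rw [show PySem.List.insertBy (fun a b => decide (a.2 < b.2)) x (y :: z :: zs)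
              = y :: PySem.List.insertBy (fun a b => decide (a.2 < b.2)) x (z :: zs) by
            simp [PySem.List.insertBy, hlt]]
        rw [List.getLast?_cons, this]
        split <;> rfl
  -- note: getLast?_cons gives (insert ...).getLast?.or (some y); nonempty kills the .or

lemma pv_sorted_nil_iff (cs : List (String × Int)) :
    PySem.List.sorted cs (fun x : String × Int => x.2) = [] ↔ cs = [] := by
  constructor
  · intro h
    have := PySem.List.length_sorted (xs := cs) (key := fun x => x.2) (rev := false)
    simpa [h, List.length_eq_zero_iff] using this.symm
  · intro h; subst h; rfl

lemma pv_core (cs : List (String × Int)) :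
    cs.foldl pvBestStep (none, 0) =
      match (PySem.List.sorted cs (fun x : String × Int => x.2)).getLast? with
      | none => (none, 0)
      | some c => (some c.1, c.2) := by
  induction cs using List.reverseRecOn with
  | nil => rfl
  | append_singleton cs x ih =>
    have hsorted_app : PySem.List.sorted (cs ++ [x]) (fun x : String × Int => x.2)
        = PySem.List.insertBy (fun a b => decide (a.2 < b.2)) x
            (PySem.List.sorted cs (fun x : String × Int => x.2)) := by
      simp [PySem.List.sorted, List.foldl_append]
    rw [List.foldl_append, List.foldl_cons, List.foldl_nil, ih, hsorted_app]
    cases hlast : (PySem.List.sorted cs (fun x : String × Int => x.2)).getLast? with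
    | none =>
      have : PySem.List.sorted cs (fun x : String × Int => x.2) = [] := List.getLast?_eq_none_iff.mp hlast
      simp [this, PySem.List.insertBy, pvBestStep]
    | some m =>
      have hpw : (PySem.List.sorted cs (fun x : String × Int => x.2)).Pairwise (fun a b => a.2 ≤ b.2) :=
        PySem.List.sorted_pairwise cs (fun x : String × Int => x.2)
      rw [pv_insertBy_getLast x m _ hpw hlast]
      unfold pvBestStep
      by_cases h : m.2 ≤ x.2 <;> simp [h]

lemma pv_pyGet?_neg_one {α : Type} (l : List α) (h : l ≠ []) :
    PySem.List.pyGet? l (-1) = l.getLast? := by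
  have hlen : 1 ≤ l.length := List.length_pos_iff.mpr h
  have h1 : ((l.length : Int) + -1) = ((l.length - 1 : Nat) : Int) := by omega
  simp only [PySem.List.pyGet?, PySem.List.pyIdx?]
  rw [List.getLast?_eq_getElem?]
  norm_num [h1, hlen]

-- ===== VERDICT (by name: the statement is the Claim_ definition above) =====
theorem parse_srcset_spec : Claim_equal_parse_srcset := by
  intro srcset _
  unfold Spec_parse_srcset parse_srcset parse_srcset_alt
  rw [pvA_fold, pvB_fold, List.nil_append, pv_core]
  by_cases hempty : srcset == ""
  · rw [if_pos hempty]
    have : srcset = "" := by simpa using hempty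
    subst this
    rfl
  · rw [if_neg hempty]
    set cands := ((PySem.Str.split? srcset ",").getD []).filterMap pvCand? with hc
    by_cases hnil : cands = []
    · simp only [hnil]; rfl
    · rw [if_neg (by simpa using hnil)]
      have hsne : PySem.List.sorted cands (fun x : String × Int => x.2) ≠ [] := by
        simpa [Ne, pv_sorted_nil_iff] using hnil
      change (match PySem.List.pyGet? (PySem.List.sorted cands (fun x : String × Int => x.2)) (-1) with
          | some c => some c.1 | none => none) = _
      rw [pv_pyGet?_neg_one _ hsne]
      cases hlast : (PySem.List.sorted cands (fun x : String × Int => x.2)).getLast? with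
      | none => exact absurd (List.getLast?_eq_none_iff.mp hlast) hsne
      | some c => simp
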